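-- pv_equiv track=rewrite | github.com/albertwcheng/albert-bioinformatics-scripts | assembleTranscriptsFromMAFStitchedContigBedSeq.py | getGappedLenForUngappedK
-- ===== SOURCE A (Python) =====
-- def getGappedLenForUngappedK(S,k):
-- 	l=0
-- 	U=""
-- 	if k<=0:
-- 		return 0
--
-- 	for i in range(0,len(S)):
-- 		s=S[i]
-- 		if s!="-":
-- 			l+=1
--
-- 		if l==k:
-- 			return i+1
--
-- 	return len(S)
-- ===== SOURCE B (Python) =====
-- def getGappedLenForUngappedK(S, k):
--     if k <= 0:
--         return 0
--     positions = [i for i, c in enumerate(S) if c != "-"]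
--     if k <= len(positions):
--         return positions[k - 1] + 1
--     return len(S)
-- ===== Notes on version B (the rewrite author's own statement) =====
-- stated objective: alternative
-- what changed: Replaces the counting loop with an early return by a precomputed index table of non-gap positions answered by a single lookup.
import Mathlib
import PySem

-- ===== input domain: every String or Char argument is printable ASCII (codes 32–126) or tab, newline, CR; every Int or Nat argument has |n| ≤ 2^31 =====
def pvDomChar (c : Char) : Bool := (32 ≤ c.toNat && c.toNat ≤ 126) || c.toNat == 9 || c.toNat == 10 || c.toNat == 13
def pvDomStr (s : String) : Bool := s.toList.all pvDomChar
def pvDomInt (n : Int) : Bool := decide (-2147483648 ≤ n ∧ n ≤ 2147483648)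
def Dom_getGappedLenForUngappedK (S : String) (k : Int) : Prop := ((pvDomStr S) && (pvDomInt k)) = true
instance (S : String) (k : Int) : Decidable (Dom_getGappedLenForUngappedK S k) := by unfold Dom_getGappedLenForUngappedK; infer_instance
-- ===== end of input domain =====

-- B replaces A's counting loop with an early return by a precomputed table of
-- non-gap positions answered by a single lookup (alternative decomposition, same cost).

-- ===== PORT A =====
-- A's for-loop over range(len(S)) with running count l and early return, as structural
-- recursion over the characters carrying the index i and the count l.
def pvALoop (k n : Int) : List Char → Int → Int → Int
  | [], _, _ => n
  | c :: rest, i, l =>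
    let l' := if c ≠ '-' then l + 1 else l
    if l' = k then i + 1 else pvALoop k n rest (i + 1) l'

def getGappedLenForUngappedK (S : String) (k : Int) : Int :=
  if k ≤ 0 then 0 else pvALoop k (S.toList.length : Int) S.toList 0 0

-- ===== PORT B =====
def getGappedLenForUngappedK_alt (S : String) (k : Int) : Int :=
  if k ≤ 0 then 0
  else
    let positions := ((PySem.List.enumerate S.toList 0).filter (fun p => p.2 ≠ '-')).map (·.1)
    if k ≤ (positions.length : Int) then (PySem.List.pyGet? positions (k - 1)).getD 0 + 1
    else (S.toList.length : Int)

-- ===== PRECONDITION & SPEC =====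
def Spec_getGappedLenForUngappedK (S : String) (k : Int) (out : Int) : Prop := out = getGappedLenForUngappedK_alt S k
instance (S : String) (k : Int) (out : Int) : Decidable (Spec_getGappedLenForUngappedK S k out) := by unfold Spec_getGappedLenForUngappedK; infer_instance

-- ===== CLAIM (what is proved, stated in full; the proofs are below) =====
def Claim_equal_getGappedLenForUngappedK : Prop := ∀ (S : String) (k : Int), Dom_getGappedLenForUngappedK S k → Spec_getGappedLenForUngappedK S k (getGappedLenForUngappedK S k)

-- ===== LEMMAS AND PROOFS =====

lemma pvALoop_eq (cs : List Char) : ∀ (i l k n : Int), l < k →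
    pvALoop k n cs i l =
      (let ps := ((PySem.List.enumerate cs i).filter (fun p => p.2 ≠ '-')).map (·.1)
       if k - l ≤ (ps.length : Int) then (PySem.List.pyGet? ps (k - l - 1)).getD 0 + 1 else n) := by
  induction cs with
  | nil =>
    intro i l k n hlk
    simp [pvALoop, PySem.List.enumerate_nil]
    omega
  | cons c rest ih =>
    intro i l k n hlk
    rw [PySem.List.enumerate_cons]
    have hstep : pvALoop k n (c :: rest) i l =
        (if (if c ≠ '-' then l + 1 else l) = k then i + 1
         else pvALoop k n rest (i + 1) (if c ≠ '-' then l + 1 else l)) := rfl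
    by_cases hc : c = '-'
    · -- gap character: count unchanged, filter drops the pair
      have hne : ¬ (l = k) := by omega
      rw [hstep]
      simp only [List.filter_cons]
      simp [hc, hne, ih (i + 1) l k n hlk]
    · -- non-gap character: count increments, filter keeps the pair
      rw [hstep]
      simp only [List.filter_cons, hc, ne_eq, not_false_eq_true, decide_not,
        decide_false, Bool.not_false, if_true, List.map_cons, List.length_cons]
      by_cases hk : l + 1 = k
      · -- early return at this character: it is the k-th non-gap one
        rw [if_pos hk, show k - l - 1 = 0 by omega]
        split_ifs with h
        · rw [PySem.List.pyGet?_zero_cons]; simp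
        · exfalso; push_cast at h; omega
      · -- keep scanning with the incremented count
        rw [if_neg hk, ih (i + 1) (l + 1) k n (by omega)]
        simp only [ne_eq, decide_not]
        set ps' := ((PySem.List.enumerate rest (i + 1)).filter (fun p => !decide (p.2 = '-'))).map (fun x => x.1) with hps
        split_ifs with h1 h2 h2
        · rw [PySem.List.pyGet?_of_nonneg ps' (by omega),
              PySem.List.pyGet?_of_nonneg (i :: ps') (by omega)]
          rw [show (k - l - 1).toNat = (k - (l + 1) - 1).toNat + 1 by omega,
              List.getElem?_cons_succ]
        · exfalso; push_cast at h1 h2; omega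
        · exfalso; push_cast at h1 h2; omega
        · rfl

-- ===== VERDICT (by name: the statement is the Claim_ definition above) =====
theorem getGappedLenForUngappedK_spec : Claim_equal_getGappedLenForUngappedK := by
  intro S k _
  unfold Spec_getGappedLenForUngappedK getGappedLenForUngappedK getGappedLenForUngappedK_alt
  by_cases hk : k ≤ 0
  · simp [hk]
  · rw [if_neg hk, if_neg hk, pvALoop_eq S.toList 0 0 k _ (by omega)]
    simp
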